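-- pv_equiv track=rewrite | github.com/Sayapov/dflux | src/dflux/causal_primitives.py | _joint_histogram
-- ===== SOURCE A (Python) =====
-- from typing import List, Optional, Dict, Any, Tuple
--
-- def _joint_histogram(
--     cause_bins: List[int], effect_bins: List[int], n_bins: int
-- ) -> List[List[int]]:
--     """Joint count histogram [cause_bin][effect_bin]."""
--     joint = [[0] * n_bins for _ in range(n_bins)]
--     for c, e in zip(cause_bins, effect_bins):
--         if 0 <= c < n_bins and 0 <= e < n_bins:
--             joint[c][e] += 1
--     return joint
-- ===== SOURCE B (Python) =====
-- def _joint_histogram(cause_bins, effect_bins, n_bins):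
--     """Joint count histogram [cause_bin][effect_bin]."""
--     pairs = list(zip(cause_bins, effect_bins))
--     return [[pairs.count((c, e)) for e in range(n_bins)] for c in range(n_bins)]
-- ===== Notes on version B (the rewrite author's own statement) =====
-- stated objective: simpler
-- what changed: A makes one scatter pass over the zipped pairs, mutating joint[c][e] += 1 under a bounds guard; B never builds or mutates an accumulator at all: it materialises the pair list once and computes every cell independently as pairs.count((c, e)) in a nested comprehension (out-of-range pairs simply never match an in-range cell, so no bounds test exists).
import Mathlib
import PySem

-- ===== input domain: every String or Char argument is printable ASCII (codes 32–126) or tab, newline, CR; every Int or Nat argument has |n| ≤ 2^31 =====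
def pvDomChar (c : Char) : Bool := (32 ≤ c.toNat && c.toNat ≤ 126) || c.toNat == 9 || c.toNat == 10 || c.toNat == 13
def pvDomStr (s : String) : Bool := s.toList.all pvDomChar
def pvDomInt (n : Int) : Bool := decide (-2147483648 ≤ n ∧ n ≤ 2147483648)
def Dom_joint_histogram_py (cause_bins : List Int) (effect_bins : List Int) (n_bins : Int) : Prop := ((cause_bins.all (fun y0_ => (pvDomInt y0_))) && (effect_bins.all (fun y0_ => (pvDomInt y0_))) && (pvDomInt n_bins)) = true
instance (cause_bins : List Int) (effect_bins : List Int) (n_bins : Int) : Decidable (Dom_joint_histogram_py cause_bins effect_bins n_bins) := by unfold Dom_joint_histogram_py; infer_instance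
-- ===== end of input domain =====

-- B replaces A's mutating scatter pass by a pure nested comprehension counting each cell's
-- pair directly in the pair list (objective: simpler — no accumulator, no bounds guard; not faster).

-- ===== PORT A =====
-- loop body of A's 'for c, e in zip(...): if 0 <= c < n_bins and 0 <= e < n_bins: joint[c][e] += 1'
def jhStep (n_bins : Int) (joint : List (List Int)) (ce : Int × Int) : List (List Int) :=
  if 0 ≤ ce.1 ∧ ce.1 < n_bins ∧ 0 ≤ ce.2 ∧ ce.2 < n_bins then
    joint.modify ce.1.toNat (fun row => row.modify ce.2.toNat (· + 1))
  else joint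

def joint_histogram_py (cause_bins : List Int) (effect_bins : List Int) (n_bins : Int) : List (List Int) :=
  (cause_bins.zip effect_bins).foldl (jhStep n_bins)
    (List.replicate n_bins.toNat (List.replicate n_bins.toNat 0))

-- ===== PORT B =====
-- 'pairs = list(zip(cause_bins, effect_bins))'
def jhPairs (cause_bins : List Int) (effect_bins : List Int) : List (Int × Int) :=
  cause_bins.zip effect_bins

-- '[[pairs.count((c, e)) for e in range(n_bins)] for c in range(n_bins)]'
def joint_histogram_py_alt (cause_bins : List Int) (effect_bins : List Int) (n_bins : Int) : List (List Int) :=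
  (PySem.List.pyRange 0 n_bins 1).map (fun c =>
    (PySem.List.pyRange 0 n_bins 1).map (fun e =>
      (PySem.List.count (jhPairs cause_bins effect_bins) (c, e) : Int)))

-- ===== PRECONDITION & SPEC =====
def Spec_joint_histogram_py (cause_bins : List Int) (effect_bins : List Int) (n_bins : Int) (out : List (List Int)) : Prop := out = joint_histogram_py_alt cause_bins effect_bins n_bins
instance (cause_bins : List Int) (effect_bins : List Int) (n_bins : Int) (out : List (List Int)) : Decidable (Spec_joint_histogram_py cause_bins effect_bins n_bins out) := by unfold Spec_joint_histogram_py; infer_instance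

-- ===== CLAIM =====
def Claim_equal_joint_histogram_py : Prop := ∀ (cause_bins : List Int) (effect_bins : List Int) (n_bins : Int), Dom_joint_histogram_py cause_bins effect_bins n_bins → Spec_joint_histogram_py cause_bins effect_bins n_bins (joint_histogram_py cause_bins effect_bins n_bins)

-- ===== LEMMAS AND PROOFS =====

theorem getD_modify_ne {α : Type} (r : List α) (f : α → α) (b j : Nat) (h : b ≠ j) (d : α) :
    (r.modify b f).getD j d = r.getD j d := by
  simp [List.getD_eq_getElem?_getD, h]

theorem getD_modify_self {α : Type} (r : List α) (f : α → α) (j : Nat) (hj : j < r.length) (d : α) :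
    (r.modify j f).getD j d = f (r.getD j d) := by
  simp [List.getD_eq_getElem?_getD, List.getElem?_eq_getElem hj]

theorem length_foldl_jhStep (n : Int) (l : List (Int × Int)) (M : List (List Int)) :
    (l.foldl (jhStep n) M).length = M.length := by
  induction l generalizing M with
  | nil => rfl
  | cons p t ih =>
    simp only [List.foldl_cons]
    rw [ih]
    unfold jhStep
    split <;> simp

theorem rows_foldl_jhStep (n : Int) (l : List (Int × Int)) (k : Nat)
    (M : List (List Int)) (hM : ∀ row ∈ M, row.length = k) :
    ∀ row ∈ l.foldl (jhStep n) M, row.length = k := by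
  induction l generalizing M with
  | nil => exact hM
  | cons p t ih =>
    simp only [List.foldl_cons]
    refine ih _ ?_
    intro row hrow
    unfold jhStep at hrow
    split at hrow
    · rcases List.mem_iff_getElem?.1 hrow with ⟨i, hi⟩
      rw [List.getElem?_modify] at hi
      cases hM' : M[i]? with
      | none => rw [hM'] at hi; simp at hi
      | some r =>
        have hrM : r ∈ M := List.mem_of_getElem? hM'
        rw [hM'] at hi
        simp only [Option.map_eq_map, Option.map_some, Option.some.injEq] at hi
        split at hi <;> simp [← hi, hM r hrM]
    · exact hM row hrow

theorem cell_foldl_jhStep (n : Int) (l : List (Int × Int)) (M : List (List Int))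
    (hlen : M.length = n.toNat) (hrows : ∀ row ∈ M, row.length = n.toNat)
    (i j : Nat) (hi : i < n.toNat) (hj : j < n.toNat) :
    ((l.foldl (jhStep n) M).getD i []).getD j 0 =
      (M.getD i []).getD j 0 + (l.count ((i : Int), (j : Int)) : Int) := by
  induction l generalizing M with
  | nil => simp
  | cons p t ih =>
    simp only [List.foldl_cons]
    have hstep_len : (jhStep n M p).length = n.toNat := by
      unfold jhStep; split <;> simp [hlen]
    have hstep_rows : ∀ row ∈ jhStep n M p, row.length = n.toNat := by
      have := rows_foldl_jhStep n [p] n.toNat M hrows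
      simpa using this
    have hiM : i < M.length := by omega
    have hMiM : M.getD i [] ∈ M := by
      rw [List.getD_eq_getElem _ _ hiM]; exact List.getElem_mem hiM
    have hjrow : j < (M.getD i []).length := by rw [hrows _ hMiM]; exact hj
    rw [ih _ hstep_len hstep_rows, List.count_cons]
    have hcell : ((jhStep n M p).getD i []).getD j 0 =
        (M.getD i []).getD j 0 +
          (if (p == ((i : Int), (j : Int))) = true then (1 : Int) else 0) := by
      unfold jhStep
      split
      · rename_i hguard
        obtain ⟨h01, h1n, h02, h2n⟩ := hguard
        by_cases h1 : p.1.toNat = i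
        · rw [h1, getD_modify_self M _ i hiM]
          by_cases h2 : p.2.toNat = j
          · rw [h2, getD_modify_self _ _ j hjrow]
            have hp : p = ((i : Int), (j : Int)) := by
              exact Prod.ext (by omega) (by omega)
            simp [hp]
          · rw [getD_modify_ne _ _ _ _ h2]
            have hp : p ≠ ((i : Int), (j : Int)) := by
              intro hc; apply h2; rw [hc]; simp
            simp [hp]
        · rw [getD_modify_ne _ _ _ _ h1]
          have hp : p ≠ ((i : Int), (j : Int)) := by
            intro hc; apply h1; rw [hc]; simp
          simp [hp]
      · rename_i hguard
        have hp : p ≠ ((i : Int), (j : Int)) := by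
          intro hc
          apply hguard
          rw [hc]
          refine ⟨by positivity, by omega, by positivity, by omega⟩
        simp [hp]
    rw [hcell]
    push_cast
    ring

theorem pysem_count_eq (l : List (Int × Int)) (x : Int × Int) :
    ((PySem.List.count l x : Nat) : Int) = (l.count x : Int) := by
  simp [PySem.List.count, List.count]

-- ===== VERDICT =====
theorem joint_histogram_py_spec : Claim_equal_joint_histogram_py := by
  unfold Claim_equal_joint_histogram_py
  intro cb eb n _
  unfold Spec_joint_histogram_py joint_histogram_py joint_histogram_py_alt jhPairs
  have hA_len : ((cb.zip eb).foldl (jhStep n)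
      (List.replicate n.toNat (List.replicate n.toNat 0))).length = n.toNat := by
    rw [length_foldl_jhStep]; simp
  have hrows0 : ∀ row ∈ List.replicate n.toNat (List.replicate n.toNat (0 : Int)),
      row.length = n.toNat := by
    intro row hrow
    rw [List.eq_of_mem_replicate hrow]; simp
  have hA_rows := rows_foldl_jhStep n (cb.zip eb) n.toNat _ hrows0
  have hB_len : ((PySem.List.pyRange 0 n 1).map (fun c =>
      (PySem.List.pyRange 0 n 1).map (fun e => (PySem.List.count (cb.zip eb) (c, e) : Int)))).length
      = n.toNat := by
    simp [PySem.List.length_pyRange_one]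
  apply List.ext_getElem (by rw [hA_len, hB_len])
  intro i hi1 hi2
  have hi : i < n.toNat := by omega
  have hn : ((n.toNat : Int)) = n := by omega
  have hBrow : ((PySem.List.pyRange 0 n 1).map (fun c =>
      (PySem.List.pyRange 0 n 1).map (fun e => (PySem.List.count (cb.zip eb) (c, e) : Int))))[i]? =
      some ((PySem.List.pyRange 0 n 1).map (fun e => (PySem.List.count (cb.zip eb) ((i : Int), e) : Int))) := by
    rw [← hn]
    exact PySem.List.getElem?_map_pyRange_zero _ n.toNat i hi
  have hBrow' : ((PySem.List.pyRange 0 n 1).map (fun c =>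
      (PySem.List.pyRange 0 n 1).map (fun e => (PySem.List.count (cb.zip eb) (c, e) : Int))))[i] =
      (PySem.List.pyRange 0 n 1).map (fun e => (PySem.List.count (cb.zip eb) ((i : Int), e) : Int)) := by
    have := List.getElem?_eq_getElem hi2
    rw [this] at hBrow
    exact Option.some.inj hBrow
  rw [hBrow']
  have hArow_mem : ((cb.zip eb).foldl (jhStep n)
      (List.replicate n.toNat (List.replicate n.toNat 0)))[i] ∈
      (cb.zip eb).foldl (jhStep n) (List.replicate n.toNat (List.replicate n.toNat 0)) :=
    List.getElem_mem hi1
  have hArow_len := hA_rows _ hArow_mem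
  apply List.ext_getElem (by rw [hArow_len]; simp [PySem.List.length_pyRange_one])
  intro j hj1 hj2
  have hj : j < n.toNat := by omega
  have hBcell : ((PySem.List.pyRange 0 n 1).map
      (fun e => (PySem.List.count (cb.zip eb) ((i : Int), e) : Int)))[j]? =
      some ((PySem.List.count (cb.zip eb) ((i : Int), (j : Int)) : Int)) := by
    rw [← hn]
    exact PySem.List.getElem?_map_pyRange_zero _ n.toNat j hj
  have hBcell' : ((PySem.List.pyRange 0 n 1).map
      (fun e => (PySem.List.count (cb.zip eb) ((i : Int), e) : Int)))[j] =
      (PySem.List.count (cb.zip eb) ((i : Int), (j : Int)) : Int) := by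
    have := List.getElem?_eq_getElem hj2
    rw [this] at hBcell
    exact Option.some.inj hBcell
  rw [hBcell', pysem_count_eq]
  have hkey := cell_foldl_jhStep n (cb.zip eb)
    (List.replicate n.toNat (List.replicate n.toNat 0)) (by simp) hrows0 i j hi hj
  have hzero : ((List.replicate n.toNat (List.replicate n.toNat (0 : Int))).getD i []).getD j 0
      = 0 := by
    have h1 : (List.replicate n.toNat (List.replicate n.toNat (0 : Int))).getD i [] =
        List.replicate n.toNat 0 := by
      rw [List.getD_eq_getElem _ _ (by simpa using hi)]; simp
    rw [h1, List.getD_eq_getElem _ _ (by simpa using hj)]; simp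
  rw [hzero, zero_add] at hkey
  rw [← hkey]
  rw [List.getD_eq_getElem _ _ hi1, List.getD_eq_getElem _ _ hj1]
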